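-- pv_equiv track=rewrite | github.com/seseWho/rag-assistant-app | src/rag_assistant_app/ingestion/chunking.py | _merge_atoms
-- ===== SOURCE A (Python) =====
-- def _next_chunk_start(atoms: list[str], start: int, end: int, chunk_overlap: int) -> int:
--     """Walk back from end to find the atom index where the overlap window begins."""
--     accumulated = 0
--     new_start = end
--     while new_start > start + 1:
--         new_start -= 1
--         accumulated += len(atoms[new_start]) + 1
--         if accumulated >= chunk_overlap:
--             break
--     return new_start
--
-- def _merge_atoms(atoms: list[str], chunk_size: int, chunk_overlap: int) -> list[str]:
--     """Merge atoms into chunks of up to chunk_size chars with chunk_overlap char overlap."""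
--     if not atoms:
--         return []
--
--     chunks: list[str] = []
--     start = 0
--
--     while start < len(atoms):
--         end = start
--         current_len = 0
--         while end < len(atoms):
--             sep_len = 1 if end > start else 0
--             if current_len + sep_len + len(atoms[end]) > chunk_size and end > start:
--                 break
--             current_len += sep_len + len(atoms[end])
--             end += 1
--
--         if end == start:
--             chunks.append(atoms[start])
--             start += 1
--             continue
--
--         chunks.append("\n".join(atoms[start:end]))
--         start = end if chunk_overlap == 0 else _next_chunk_start(atoms, start, end, chunk_overlap)
--
--     return chunks
-- ===== SOURCE B (Python) =====
-- from bisect import bisect_right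
--
--
-- def _merge_atoms(atoms: list[str], chunk_size: int, chunk_overlap: int) -> list[str]:
--     """Merge atoms into chunks of up to chunk_size chars with chunk_overlap char overlap.
--
--     Prefix-sum + binary-search reformulation: C[i] is the joined length of
--     atoms[:i] plus one trailing separator, so len("\n".join(atoms[s:e])) is
--     C[e] - C[s] - 1.  Each chunk end and each overlap start is found by
--     bisecting C instead of scanning atoms.
--     """
--     if not atoms:
--         return []
--
--     C = [0]
--     for a in atoms:
--         C.append(C[-1] + len(a) + 1)
--
--     chunks: list[str] = []
--     start = 0
--     n = len(atoms)
--     while start < n: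
--         # largest end with C[end] - C[start] - 1 <= chunk_size, but at least
--         # start + 1 so an oversized single atom still forms its own chunk
--         end = max(start + 1, bisect_right(C, chunk_size + C[start] + 1) - 1)
--         chunks.append("\n".join(atoms[start:end]))
--         if chunk_overlap == 0:
--             start = end
--         else:
--             # largest j whose suffix overlap C[end] - C[j] reaches chunk_overlap,
--             # clamped into (start, end)
--             j = bisect_right(C, C[end] - chunk_overlap) - 1
--             start = max(start + 1, min(end - 1, j))
--     return chunks
-- ===== Notes on version B (the rewrite author's own statement) =====
-- stated objective: alternative
-- what changed: Replaces A's per-chunk forward scan and backward overlap walk with one precomputed prefix-sum array C (C[i] = joined length of atoms[:i] plus a separator) and two bisect_right binary searches per chunk: the chunk end is the largest e with C[e]-C[start]-1 <= chunk_size (floored at start+1), and the overlap start is the largest j with C[end]-C[j] >= chunk_overlap clamped into (start, end); intended as faster on overlap-heavy inputs (measured 9.82x at the largest size both finished, unconfirmed at sizes where both time out on quadratic-size output).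
import Mathlib
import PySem

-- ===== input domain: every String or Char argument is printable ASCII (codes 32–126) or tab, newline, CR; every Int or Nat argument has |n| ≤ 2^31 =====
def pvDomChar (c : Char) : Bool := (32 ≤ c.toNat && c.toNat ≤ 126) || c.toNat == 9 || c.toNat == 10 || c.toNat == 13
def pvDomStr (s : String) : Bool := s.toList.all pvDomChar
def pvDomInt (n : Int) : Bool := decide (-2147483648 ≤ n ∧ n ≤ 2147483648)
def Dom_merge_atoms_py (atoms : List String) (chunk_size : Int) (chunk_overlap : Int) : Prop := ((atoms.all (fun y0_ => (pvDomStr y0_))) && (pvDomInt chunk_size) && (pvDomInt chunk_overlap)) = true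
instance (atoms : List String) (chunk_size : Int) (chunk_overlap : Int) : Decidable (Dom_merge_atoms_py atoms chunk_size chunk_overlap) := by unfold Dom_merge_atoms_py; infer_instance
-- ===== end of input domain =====

-- B replaces A's per-chunk forward scan and backward overlap walk by a different
-- algorithm: a prefix-sum array over atom lengths with two bisect_right binary
-- searches per chunk; proved to return the same chunk list on every input.


-- ===== PORT A =====
-- Inner `while end < len(atoms)` loop of _merge_atoms: state (end, current_len).
-- fuel only makes the recursion structural (callers pass enough for every iteration);
-- atoms[end] is always indexed in range here, so List.getD is exact.
def pvInnerA (atoms : List String) (chunk_size : Int) (start : Nat) : Nat → Nat → Int → Nat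
  | 0, e, _ => e
  | fuel + 1, e, cur =>
    if e < atoms.length then
      if cur + (if start < e then (1:Int) else 0) + PySem.Str.len (atoms.getD e "") > chunk_size ∧ start < e then
        e
      else
        pvInnerA atoms chunk_size start fuel (e + 1) (cur + (if start < e then (1:Int) else 0) + PySem.Str.len (atoms.getD e ""))
    else e

-- _next_chunk_start: walk new_start back from end accumulating len(atoms[new_start]) + 1
-- (the loop variable new_start itself is the structural measure).
def pvNextA (atoms : List String) (start : Nat) (chunk_overlap : Int) : Nat → Int → Nat
  | 0, _ => 0
  | ns + 1, acc =>
    if start + 1 < ns + 1 then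
      if acc + PySem.Str.len (atoms.getD ns "") + 1 ≥ chunk_overlap then ns
      else pvNextA atoms start chunk_overlap ns (acc + PySem.Str.len (atoms.getD ns "") + 1)
    else ns + 1

-- Outer `while start < len(atoms)` loop of _merge_atoms (fuel = remaining iterations;
-- start strictly increases each iteration, so the entry fuel atoms.length is enough).
def pvOuterA (atoms : List String) (chunk_size chunk_overlap : Int) : Nat → Nat → List String
  | 0, _ => []
  | fuel + 1, start =>
    if start < atoms.length then
      let e := pvInnerA atoms chunk_size start (atoms.length - start) start 0
      if e = start then
        atoms.getD start "" :: pvOuterA atoms chunk_size chunk_overlap fuel (start + 1)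
      else
        PySem.Str.join "\n" (PySem.List.slice atoms (some (start : Int)) (some (e : Int))) ::
          pvOuterA atoms chunk_size chunk_overlap fuel
            (if chunk_overlap = 0 then e else pvNextA atoms start chunk_overlap e 0)
    else []

def merge_atoms_py (atoms : List String) (chunk_size : Int) (chunk_overlap : Int) : List String :=
  if atoms = [] then [] else pvOuterA atoms chunk_size chunk_overlap atoms.length 0

-- ===== PORT B =====
-- C = [0]; for a in atoms: C.append(C[-1] + len(a) + 1)
def pvBuildC (atoms : List String) : List Int :=
  atoms.foldl (fun C a => C ++ [C.getLastD 0 + PySem.Str.len a + 1]) [0]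

-- Outer `while start < n` loop of B: chunk end and overlap start found by bisect_right
-- on C (fuel = remaining iterations, as in A's port).
def pvOuterB (atoms : List String) (chunk_size chunk_overlap : Int) (C : List Int) : Nat → Nat → List String
  | 0, _ => []
  | fuel + 1, start =>
    if start < atoms.length then
      let e := max (start + 1) (PySem.List.bisectRight C (chunk_size + C.getD start 0 + 1) - 1)
      PySem.Str.join "\n" (PySem.List.slice atoms (some (start : Int)) (some (e : Int))) ::
        pvOuterB atoms chunk_size chunk_overlap C fuel
          (if chunk_overlap = 0 then e
           else max (start + 1) (min (e - 1) (PySem.List.bisectRight C (C.getD e 0 - chunk_overlap) - 1)))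
    else []

def merge_atoms_py_alt (atoms : List String) (chunk_size : Int) (chunk_overlap : Int) : List String :=
  if atoms = [] then [] else pvOuterB atoms chunk_size chunk_overlap (pvBuildC atoms) atoms.length 0

-- ===== PRECONDITION & SPEC =====
def Spec_merge_atoms_py (atoms : List String) (chunk_size : Int) (chunk_overlap : Int) (out : List String) : Prop := out = merge_atoms_py_alt atoms chunk_size chunk_overlap
instance (atoms : List String) (chunk_size : Int) (chunk_overlap : Int) (out : List String) : Decidable (Spec_merge_atoms_py atoms chunk_size chunk_overlap out) := by unfold Spec_merge_atoms_py; infer_instance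

-- ===== CLAIM (what is proved, stated in full; the proofs are below) =====
def Claim_equal_merge_atoms_py : Prop := ∀ (atoms : List String) (chunk_size : Int) (chunk_overlap : Int), Dom_merge_atoms_py atoms chunk_size chunk_overlap → Spec_merge_atoms_py atoms chunk_size chunk_overlap (merge_atoms_py atoms chunk_size chunk_overlap)

-- ===== LEMMAS AND PROOFS =====

-- prefix sums of len(atom) + 1: the values B stores in C
def pvCsum (atoms : List String) : Nat → Int
  | 0 => 0
  | i + 1 => pvCsum atoms i + PySem.Str.len (atoms.getD i "") + 1

theorem pvCsum_succ (atoms : List String) (i : Nat) :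
    pvCsum atoms (i + 1) = pvCsum atoms i + PySem.Str.len (atoms.getD i "") + 1 := rfl

theorem pvCsum_strictMono (atoms : List String) : StrictMono (pvCsum atoms) := by
  apply strictMono_nat_of_lt_succ
  intro i
  have h : (0:Int) ≤ PySem.Str.len (atoms.getD i "") := by
    rw [PySem.Str.len_eq]; positivity
  rw [pvCsum_succ]; omega

theorem pvBuildC_eq (atoms : List String) :
    pvBuildC atoms = (List.range (atoms.length + 1)).map (pvCsum atoms) := by
  suffices h : ∀ (l : List String) (k : Nat), k + l.length = atoms.length → atoms.drop k = l →
      l.foldl (fun C a => C ++ [C.getLastD 0 + PySem.Str.len a + 1])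
        ((List.range (k + 1)).map (pvCsum atoms))
      = (List.range (atoms.length + 1)).map (pvCsum atoms) by
    have h0 := h atoms 0 (by omega) (by simp)
    simpa [pvBuildC, pvCsum] using h0
  intro l
  induction l with
  | nil =>
    intro k hk _
    simp only [List.length_nil, Nat.add_zero] at hk
    simp [hk]
  | cons a l ih =>
    intro k hk hdrop
    have hklt : k < atoms.length := by
      simp only [List.length_cons] at hk; omega
    have ha : a = atoms.getD k "" := by
      have h1 : (atoms.drop k)[0]? = atoms[k]? := by
        rw [List.getElem?_drop]; norm_num
      rw [hdrop] at h1
      simp only [List.getElem?_cons_zero] at h1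
      rw [List.getD_eq_getElem?_getD, ← h1]
      rfl
    have hdrop' : atoms.drop (k + 1) = l := by
      have h2 : (atoms.drop k).drop 1 = atoms.drop (k + 1) := by
        rw [List.drop_drop]
      rw [hdrop] at h2
      simpa using h2.symm
    have hstep : ((List.range (k + 1)).map (pvCsum atoms))
          ++ [((List.range (k + 1)).map (pvCsum atoms)).getLastD 0 + PySem.Str.len a + 1]
        = (List.range (k + 1 + 1)).map (pvCsum atoms) := by
      have hlast : ((List.range (k + 1)).map (pvCsum atoms)).getLastD 0 = pvCsum atoms k := by
        rw [List.range_succ, List.map_append]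
        simp
      rw [hlast, ha, ← pvCsum_succ]
      rw [List.range_succ (n := k + 1), List.map_append]
      simp
    rw [List.foldl_cons, hstep]
    exact ih (k + 1) (by simp only [List.length_cons] at hk; omega) hdrop'

theorem pvC_getD (atoms : List String) (i : Nat) (hi : i ≤ atoms.length) :
    (pvBuildC atoms).getD i 0 = pvCsum atoms i := by
  rw [pvBuildC_eq]
  exact PySem.List.getD_map_range (pvCsum atoms) (atoms.length + 1) i 0 (by omega)

theorem pvC_length (atoms : List String) : (pvBuildC atoms).length = atoms.length + 1 := by
  rw [pvBuildC_eq]; simp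

theorem pvC_pairwise (atoms : List String) : (pvBuildC atoms).Pairwise (· ≤ ·) := by
  rw [pvBuildC_eq, List.pairwise_map]
  exact List.pairwise_lt_range.imp (fun h => ((pvCsum_strictMono atoms) h).le)

-- bisect_right on C answers "pvCsum i ≤ x" threshold queries
theorem pvBisect_iff (atoms : List String) (x : Int) (i : Nat) (hi : i ≤ atoms.length) :
    (pvCsum atoms i ≤ x ↔ i < PySem.List.bisectRight (pvBuildC atoms) x) := by
  obtain ⟨hle, h1, h2⟩ := PySem.List.bisectRight_spec (pvBuildC atoms) x (pvC_pairwise atoms)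
  have hi' : i < (pvBuildC atoms).length := by rw [pvC_length]; omega
  have hget : (pvBuildC atoms)[i]'hi' = pvCsum atoms i := by
    simp [pvBuildC_eq]
  constructor
  · intro h
    by_contra hK
    have := h2 i hi' (Nat.le_of_not_lt hK)
    rw [hget] at this; omega
  · intro h
    have := h1 i hi' h
    rw [hget] at this; omega

theorem pvBisect_le_len (atoms : List String) (x : Int) :
    PySem.List.bisectRight (pvBuildC atoms) x ≤ atoms.length + 1 := by
  have := (PySem.List.bisectRight_spec (pvBuildC atoms) x (pvC_pairwise atoms)).1
  rwa [pvC_length] at this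

-- A's inner loop, from a state that already contains atoms[start:e], lands on B's end
theorem pvInnerA_eq (atoms : List String) (cs : Int) (start : Nat) :
    ∀ fuel e cur, atoms.length - e ≤ fuel → start < e → e ≤ atoms.length →
    cur = pvCsum atoms e - pvCsum atoms start - 1 →
    (∀ i, start + 1 < i → i ≤ e → pvCsum atoms i ≤ cs + pvCsum atoms start + 1) →
    pvInnerA atoms cs start fuel e cur
      = max (start + 1) (PySem.List.bisectRight (pvBuildC atoms) (cs + pvCsum atoms start + 1) - 1) := by
  intro fuel
  induction fuel with
  | zero =>
    intro e cur h0 h1 h2 _ hinv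
    have he : e = atoms.length := by omega
    simp only [pvInnerA]
    have hK1 := pvBisect_le_len atoms (cs + pvCsum atoms start + 1)
    have hK2 : start + 1 < e → e < PySem.List.bisectRight (pvBuildC atoms) (cs + pvCsum atoms start + 1) := by
      intro hlt
      exact (pvBisect_iff atoms _ e h2).mp (hinv e hlt (le_refl e))
    omega
  | succ fuel ih =>
    intro e cur h0 h1 h2 hcur hinv
    by_cases he : e < atoms.length
    · rw [pvInnerA, if_pos he]
      have hsep : (if start < e then (1:Int) else 0) = 1 := if_pos h1
      have hnext : pvCsum atoms (e + 1) = pvCsum atoms e + PySem.Str.len (atoms.getD e "") + 1 :=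
        pvCsum_succ atoms e
      by_cases hc : cur + (if start < e then (1:Int) else 0) + PySem.Str.len (atoms.getD e "") > cs
      · rw [if_pos ⟨hc, h1⟩]
        rw [hsep] at hc
        have hK1 : PySem.List.bisectRight (pvBuildC atoms) (cs + pvCsum atoms start + 1) ≤ e + 1 := by
          by_contra hK
          have := (pvBisect_iff atoms (cs + pvCsum atoms start + 1) (e + 1) (by omega)).mpr (Nat.lt_of_not_le hK)
          omega
        have hK2 : start + 1 < e → e < PySem.List.bisectRight (pvBuildC atoms) (cs + pvCsum atoms start + 1) := by
          intro hlt
          exact (pvBisect_iff atoms _ e h2).mp (hinv e hlt (le_refl e))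
        omega
      · rw [if_neg (fun hh => hc hh.1)]
        have hle : pvCsum atoms (e + 1) ≤ cs + pvCsum atoms start + 1 := by
          rw [hsep] at hc; omega
        refine ih (e + 1) _ (by omega) (by omega) (by omega) (by rw [hsep]; omega) ?_
        intro i hi1 hi2
        rcases Nat.lt_or_ge i (e + 1) with hlt | hge
        · exact hinv i hi1 (by omega)
        · have hieq : i = e + 1 := by omega
          rw [hieq]; exact hle
    · have he' : e = atoms.length := by omega
      rw [pvInnerA, if_neg he]
      have hK1 := pvBisect_le_len atoms (cs + pvCsum atoms start + 1)
      have hK2 : start + 1 < e → e < PySem.List.bisectRight (pvBuildC atoms) (cs + pvCsum atoms start + 1) := by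
        intro hlt
        exact (pvBisect_iff atoms _ e h2).mp (hinv e hlt (le_refl e))
      omega

-- A's inner loop from its real entry state (end = start, current_len = 0)
theorem pvInnerA_start (atoms : List String) (cs : Int) (start : Nat) (hs : start < atoms.length) :
    pvInnerA atoms cs start (atoms.length - start) start 0
      = max (start + 1) (PySem.List.bisectRight (pvBuildC atoms) (cs + pvCsum atoms start + 1) - 1) := by
  obtain ⟨f, hf⟩ : ∃ f, atoms.length - start = f + 1 := ⟨atoms.length - start - 1, by omega⟩
  rw [hf, pvInnerA, if_pos hs, if_neg (fun hh => absurd hh.2 (lt_irrefl start))]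
  refine pvInnerA_eq atoms cs start f (start + 1) _ (by omega) (by omega) (by omega) ?_ ?_
  · rw [if_neg (lt_irrefl start), pvCsum_succ]; ring
  · intro i hi1 hi2; omega

-- A's backward overlap walk lands on B's clamped bisect answer
theorem pvNextA_eq (atoms : List String) (ov : Int) (start : Nat) :
    ∀ ns acc, start + 1 ≤ ns → ns ≤ atoms.length →
    pvNextA atoms start ov ns acc
      = max (start + 1) (min (ns - 1)
          (PySem.List.bisectRight (pvBuildC atoms) (pvCsum atoms ns + acc - ov) - 1)) := by
  intro ns
  induction ns with
  | zero => intro acc h1 _; omega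
  | succ ns ih =>
    intro acc h1 h2
    by_cases hc : start + 1 < ns + 1
    · rw [pvNextA, if_pos hc]
      have hsucc : pvCsum atoms (ns + 1) = pvCsum atoms ns + PySem.Str.len (atoms.getD ns "") + 1 :=
        pvCsum_succ atoms ns
      by_cases hb : acc + PySem.Str.len (atoms.getD ns "") + 1 ≥ ov
      · rw [if_pos hb]
        have hJ : ns < PySem.List.bisectRight (pvBuildC atoms) (pvCsum atoms (ns + 1) + acc - ov) :=
          (pvBisect_iff atoms _ ns (by omega)).mp (by omega)
        omega
      · rw [if_neg hb]
        have hJ : PySem.List.bisectRight (pvBuildC atoms) (pvCsum atoms (ns + 1) + acc - ov) ≤ ns := by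
          by_contra hK
          have := (pvBisect_iff atoms (pvCsum atoms (ns + 1) + acc - ov) ns (by omega)).mpr (Nat.lt_of_not_le hK)
          omega
        rw [ih _ (by omega) (by omega)]
        have ht : pvCsum atoms ns + (acc + PySem.Str.len (atoms.getD ns "") + 1) - ov
            = pvCsum atoms (ns + 1) + acc - ov := by omega
        rw [ht]
        omega
    · rw [pvNextA, if_neg hc]
      have := pvBisect_le_len atoms (pvCsum atoms (ns + 1) + acc - ov)
      omega

-- the two outer loops agree from every start (fuel is consumed identically)
theorem pvOuter_eq (atoms : List String) (cs ov : Int) :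
    ∀ fuel start, start ≤ atoms.length →
    pvOuterA atoms cs ov fuel start = pvOuterB atoms cs ov (pvBuildC atoms) fuel start := by
  intro fuel
  induction fuel with
  | zero => intro start _; rfl
  | succ fuel ih =>
    intro start h1
    by_cases hs : start < atoms.length
    · have hC1 : (pvBuildC atoms).getD start 0 = pvCsum atoms start := pvC_getD atoms start (le_of_lt hs)
      have hKle := pvBisect_le_len atoms (cs + pvCsum atoms start + 1)
      have heA := pvInnerA_start atoms cs start hs
      rw [pvOuterA, pvOuterB, if_pos hs, if_pos hs]
      simp only [heA, hC1]
      have he1 : start + 1 ≤ max (start + 1) (PySem.List.bisectRight (pvBuildC atoms) (cs + pvCsum atoms start + 1) - 1) := by omega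
      have he2 : max (start + 1) (PySem.List.bisectRight (pvBuildC atoms) (cs + pvCsum atoms start + 1) - 1) ≤ atoms.length := by omega
      rw [if_neg (by omega)]
      congr 1
      set e := max (start + 1) (PySem.List.bisectRight (pvBuildC atoms) (cs + pvCsum atoms start + 1) - 1) with hedef
      have hC2 : (pvBuildC atoms).getD e 0 = pvCsum atoms e := pvC_getD atoms e he2
      by_cases hov : ov = 0
      · rw [if_pos hov, if_pos hov]
        exact ih e he2
      · rw [if_neg hov, if_neg hov]
        rw [pvNextA_eq atoms ov start e 0 he1 he2, hC2]
        have ht : pvCsum atoms e + 0 - ov = pvCsum atoms e - ov := by omega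
        rw [ht]
        have hJle := pvBisect_le_len atoms (pvCsum atoms e - ov)
        exact ih _ (by omega)
    · rw [pvOuterA, pvOuterB, if_neg hs, if_neg hs]

-- ===== VERDICT (by name: the statement is the Claim_ definition above) =====
theorem merge_atoms_py_spec : Claim_equal_merge_atoms_py := by
  intro atoms cs ov _
  unfold Spec_merge_atoms_py merge_atoms_py merge_atoms_py_alt
  by_cases h : atoms = []
  · rw [if_pos h, if_pos h]
  · rw [if_neg h, if_neg h]
    exact pvOuter_eq atoms cs ov atoms.length 0 (by omega)
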